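-- pv_equiv track=rewrite | github.com/yyozen/ZaiZaiCat-Checkin | script/wps/daily_benefits.py | _pick_lottery_session
-- ===== SOURCE A (Python) =====
-- from typing import Any, Dict, List, Optional
--
-- def _pick_lottery_session(lottery_list: List[Dict[str, Any]]) -> Optional[Dict[str, Any]]:
--     """优先挑选进行中的抽奖场次"""
--     for session in lottery_list:
--         if (
--             session.get("session_status") == "IN_PROGRESS"
--             and session.get("stock_status") in {"IN_STOCK", "", None}
--         ):
--             return session
--
--     for session in lottery_list:
--         if session.get("session_status") == "IN_PROGRESS":
--             return session
--
--     return lottery_list[0] if lottery_list else None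
-- ===== SOURCE B (Python) =====
-- from typing import Any, Dict, List, Optional
--
-- def _pick_lottery_session(lottery_list: List[Dict[str, Any]]) -> Optional[Dict[str, Any]]:
--     """Single pass: return the first in-progress session with good stock immediately,
--     remember the first plain in-progress session as a fallback."""
--     first_in_progress = None
--     for session in lottery_list:
--         if session.get("session_status") == "IN_PROGRESS":
--             if session.get("stock_status") in {"IN_STOCK", "", None}:
--                 return session
--             if first_in_progress is None:
--                 first_in_progress = session
--     if first_in_progress is not None:
--         return first_in_progress
--     return lottery_list[0] if lottery_list else None
-- ===== Notes on version B (the rewrite author's own statement) =====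
-- stated objective: simpler
-- what changed: Replaces A's two sequential scans plus fallback by one single pass over the list that returns a good-stock in-progress session immediately and remembers the first plain in-progress session as fallback.
import Mathlib
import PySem

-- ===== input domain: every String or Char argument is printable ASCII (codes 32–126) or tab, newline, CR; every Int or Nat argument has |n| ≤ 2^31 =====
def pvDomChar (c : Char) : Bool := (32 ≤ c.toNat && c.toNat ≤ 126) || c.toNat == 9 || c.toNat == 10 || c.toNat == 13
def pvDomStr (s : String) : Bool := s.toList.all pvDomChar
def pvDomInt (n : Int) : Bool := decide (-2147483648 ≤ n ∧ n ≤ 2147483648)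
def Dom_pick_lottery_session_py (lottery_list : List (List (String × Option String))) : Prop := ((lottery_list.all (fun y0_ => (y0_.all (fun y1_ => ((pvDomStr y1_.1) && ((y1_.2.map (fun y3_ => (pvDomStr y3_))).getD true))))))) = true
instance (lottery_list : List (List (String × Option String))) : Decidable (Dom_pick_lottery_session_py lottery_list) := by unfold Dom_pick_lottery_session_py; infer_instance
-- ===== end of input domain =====

-- B fuses A's two scans and fallback into one pass that remembers the first plain in-progress session (objective: simpler).


-- ===== PORT A =====
-- session.get(k)  (default None): first match in the association list, as Python's dict lookup
def pvGet (session : List (String × Option String)) (k : String) : Option String :=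
  (PySem.Dict.mk session).getD k none

def pvInProgress (session : List (String × Option String)) : Bool :=
  pvGet session "session_status" == some "IN_PROGRESS"

def pvStockOk (session : List (String × Option String)) : Bool :=
  pvGet session "stock_status" == some "IN_STOCK" ||
  pvGet session "stock_status" == some "" ||
  pvGet session "stock_status" == none

def pick_lottery_session_py (lottery_list : List (List (String × Option String))) : Option (List (String × Option String)) :=
  -- first for-loop: first IN_PROGRESS session with stock_status in {"IN_STOCK", "", None}
  match lottery_list.find? (fun s => pvInProgress s && pvStockOk s) with
  | some s => some s
  | none =>
    -- second for-loop: first IN_PROGRESS session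
    match lottery_list.find? pvInProgress with
    | some s => some s
    | none => lottery_list.head?   -- lottery_list[0] if lottery_list else None

-- ===== PORT B =====
-- single pass: early return on a good-stock in-progress session, remember the first plain in-progress one
def pvAltGo (rest : List (List (String × Option String)))
    (first_in_progress : Option (List (String × Option String)))
    (fallback : Option (List (String × Option String))) : Option (List (String × Option String)) :=
  match rest with
  | [] =>
    match first_in_progress with
    | some s => some s
    | none => fallback
  | s :: t =>
    if pvInProgress s then
      if pvStockOk s then some s
      else pvAltGo t (if first_in_progress.isNone then some s else first_in_progress) fallback
    else pvAltGo t first_in_progress fallback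

def pick_lottery_session_py_alt (lottery_list : List (List (String × Option String))) : Option (List (String × Option String)) :=
  pvAltGo lottery_list none lottery_list.head?

-- ===== PRECONDITION & SPEC =====
def Spec_pick_lottery_session_py (lottery_list : List (List (String × Option String))) (out : Option (List (String × Option String))) : Prop := out = pick_lottery_session_py_alt lottery_list
instance (lottery_list : List (List (String × Option String))) (out : Option (List (String × Option String))) : Decidable (Spec_pick_lottery_session_py lottery_list out) := by unfold Spec_pick_lottery_session_py; infer_instance

-- ===== CLAIM (what is proved, stated in full; the proofs are below) =====
def Claim_equal_pick_lottery_session_py : Prop := ∀ (lottery_list : List (List (String × Option String))), Dom_pick_lottery_session_py lottery_list → Spec_pick_lottery_session_py lottery_list (pick_lottery_session_py lottery_list)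

-- ===== LEMMAS AND PROOFS =====
theorem pvAltGo_eq (l : List (List (String × Option String)))
    (fip fb : Option (List (String × Option String))) :
    pvAltGo l fip fb =
      match l.find? (fun s => pvInProgress s && pvStockOk s) with
      | some s => some s
      | none =>
        match fip with
        | some s => some s
        | none =>
          match l.find? pvInProgress with
          | some s => some s
          | none => fb := by
  induction l generalizing fip with
  | nil => simp [pvAltGo]
  | cons s t ih =>
    by_cases hp : pvInProgress s
    · by_cases hs : pvStockOk s
      · simp [pvAltGo, hp, hs, List.find?]
      · cases fip with
        | none =>
          simp only [pvAltGo, hp, hs, if_true, Option.isNone_none, ih, List.find?]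
          simp
        | some x =>
          simp only [pvAltGo, hp, hs, if_true, Option.isNone_some, ih, List.find?]
          simp
    · simp only [pvAltGo, hp, if_false, ih, List.find?]
      simp

-- ===== VERDICT (by name: the statement is the Claim_ definition above) =====
theorem pick_lottery_session_py_spec : Claim_equal_pick_lottery_session_py := by
  intro l _
  unfold Spec_pick_lottery_session_py pick_lottery_session_py pick_lottery_session_py_alt
  rw [pvAltGo_eq]
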